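-- pv_equiv track=rewrite | github.com/zhuxiangqun/RANGEN-V2 | src/hook/explainer.py | _assess_plan_risk
-- ===== SOURCE A (Python) =====
-- from typing import Dict, List, Any, Optional, Tuple
--
-- def _assess_plan_risk(changes: List[Dict[str, Any]]) -> str:
--     """评估计划风险"""
--     if not changes:
--         return "无风险"
--
--     # 简单风险评估
--     risk_levels = []
--     for change in changes:
--         risk = change.get("risk", "low")
--         risk_levels.append(risk)
--
--     if "high" in risk_levels:
--         return "高风险 - 包含高风险变更"
--     elif "medium" in risk_levels:
--         return "中等风险 - 需要谨慎执行"
--     else: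
--         return "低风险 - 可以安全执行"
-- ===== SOURCE B (Python) =====
-- def _assess_plan_risk(changes):
--     """评估计划风险 — single-pass running-max severity instead of building a list and scanning it twice."""
--     if not changes:
--         return "无风险"
--     worst = 0
--     for change in changes:
--         r = change.get("risk", "low")
--         p = 2 if r == "high" else 1 if r == "medium" else 0
--         if p > worst:
--             worst = p
--     if worst == 2:
--         return "高风险 - 包含高风险变更"
--     if worst == 1:
--         return "中等风险 - 需要谨慎执行"
--     return "低风险 - 可以安全执行"
-- ===== Notes on version B (the rewrite author's own statement) =====
-- stated objective: simpler
-- what changed: Replaces the intermediate risk_levels list and its two membership scans by a single loop that keeps a running maximum severity (0/1/2) and maps the maximum back to a message.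
import Mathlib
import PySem

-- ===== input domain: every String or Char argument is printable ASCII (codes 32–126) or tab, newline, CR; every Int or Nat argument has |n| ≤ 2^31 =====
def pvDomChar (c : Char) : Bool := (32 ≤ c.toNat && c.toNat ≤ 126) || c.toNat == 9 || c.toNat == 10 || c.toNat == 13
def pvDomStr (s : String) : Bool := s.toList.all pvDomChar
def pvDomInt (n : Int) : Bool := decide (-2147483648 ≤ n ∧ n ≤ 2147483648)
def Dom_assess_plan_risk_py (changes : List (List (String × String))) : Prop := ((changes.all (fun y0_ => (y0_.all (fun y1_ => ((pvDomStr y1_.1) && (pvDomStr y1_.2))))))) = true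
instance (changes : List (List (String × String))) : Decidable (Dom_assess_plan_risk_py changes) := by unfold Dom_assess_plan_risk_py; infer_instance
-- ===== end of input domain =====

-- B replaces the intermediate risk_levels list and its two membership scans by a
-- single running-max severity loop; same return value, simpler shape.

-- ===== PORT A =====
def assess_plan_risk_py (changes : List (List (String × String))) : String :=
  if changes = [] then "无风险"
  else
    -- risk_levels = []; for change in changes: risk_levels.append(change.get("risk","low"))
    let risk_levels : List String :=
      changes.foldl (fun acc change => acc ++ [(PySem.Dict.mk change).getD "risk" "low"]) []
    if risk_levels.contains "high" then "高风险 - 包含高风险变更"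
    else if risk_levels.contains "medium" then "中等风险 - 需要谨慎执行"
    else "低风险 - 可以安全执行"

-- ===== PORT B =====
-- p = 2 if r == "high" else 1 if r == "medium" else 0
def pvSev (r : String) : Nat := if r = "high" then 2 else if r = "medium" then 1 else 0

-- the loop: worst = 0; for change in changes: … if p > worst: worst = p
def pvWorst (changes : List (List (String × String))) (worst : Nat) : Nat :=
  match changes with
  | [] => worst
  | c :: rest =>
      let p := pvSev ((PySem.Dict.mk c).getD "risk" "low")
      pvWorst rest (if p > worst then p else worst)

def assess_plan_risk_py_alt (changes : List (List (String × String))) : String :=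
  if changes = [] then "无风险"
  else
    let worst := pvWorst changes 0
    if worst = 2 then "高风险 - 包含高风险变更"
    else if worst = 1 then "中等风险 - 需要谨慎执行"
    else "低风险 - 可以安全执行"

-- ===== PRECONDITION & SPEC =====
def Spec_assess_plan_risk_py (changes : List (List (String × String))) (out : String) : Prop := out = assess_plan_risk_py_alt changes
instance (changes : List (List (String × String))) (out : String) : Decidable (Spec_assess_plan_risk_py changes out) := by unfold Spec_assess_plan_risk_py; infer_instance

-- ===== CLAIM (what is proved, stated in full; the proofs are below) =====
def Claim_equal_assess_plan_risk_py : Prop := ∀ (changes : List (List (String × String))), Dom_assess_plan_risk_py changes → Spec_assess_plan_risk_py changes (assess_plan_risk_py changes)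

-- ===== LEMMAS AND PROOFS =====

-- the value A's three-way membership test computes, as a severity number
def pvScore (cs : List (List (String × String))) : Nat :=
  if (cs.map (fun c => (PySem.Dict.mk c).getD "risk" "low")).contains "high" then 2
  else if (cs.map (fun c => (PySem.Dict.mk c).getD "risk" "low")).contains "medium" then 1
  else 0

theorem pvScore_le_two (cs : List (List (String × String))) : pvScore cs ≤ 2 := by
  unfold pvScore; split_ifs <;> omega

theorem pvScore_cons (c : List (String × String)) (rest : List (List (String × String))) :
    pvScore (c :: rest) = max (pvSev ((PySem.Dict.mk c).getD "risk" "low")) (pvScore rest) := by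
  by_cases h1 : (PySem.Dict.mk c).getD "risk" "low" = "high"
  · have hb := pvScore_le_two rest
    simp [pvScore] at hb
    simp [pvScore, pvSev, h1]
    omega
  · by_cases h2 : (PySem.Dict.mk c).getD "risk" "low" = "medium"
    · by_cases h3 : ∃ a ∈ rest, (PySem.Dict.mk a).getD "risk" "low" = "high" <;>
        by_cases h4 : ∃ a ∈ rest, (PySem.Dict.mk a).getD "risk" "low" = "medium" <;>
        simp [pvScore, pvSev, h2, h3, h4]
    · simp [pvScore, pvSev, h1, h2, Ne.symm h1, Ne.symm h2]

theorem pvWorst_eq_max_score (cs : List (List (String × String))) :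
    ∀ acc : Nat, pvWorst cs acc = max acc (pvScore cs) := by
  induction cs with
  | nil => intro acc; simp [pvWorst, pvScore]
  | cons c rest ih =>
      intro acc
      have hstep : (if pvSev ((PySem.Dict.mk c).getD "risk" "low") > acc
            then pvSev ((PySem.Dict.mk c).getD "risk" "low") else acc)
          = max acc (pvSev ((PySem.Dict.mk c).getD "risk" "low")) := by
        rw [Nat.max_def]; split_ifs <;> omega
      simp only [pvWorst]
      rw [hstep, ih, pvScore_cons, Nat.max_assoc]

theorem foldl_snoc_map (cs : List (List (String × String))) :
    cs.foldl (fun acc change => acc ++ [(PySem.Dict.mk change).getD "risk" "low"]) []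
      = cs.map (fun c => (PySem.Dict.mk c).getD "risk" "low") := by
  simpa using PySem.List.foldl_append_singleton_eq_map (f := fun c => (PySem.Dict.mk c).getD "risk" "low") (l := cs) (acc := [])

-- ===== VERDICT (by name: the statement is the Claim_ definition above) =====
theorem assess_plan_risk_py_spec : Claim_equal_assess_plan_risk_py := by
  intro changes _
  unfold Spec_assess_plan_risk_py assess_plan_risk_py assess_plan_risk_py_alt
  by_cases hnil : changes = []
  · simp [hnil]
  · simp only [hnil, if_false]
    rw [foldl_snoc_map, pvWorst_eq_max_score, Nat.zero_max]
    by_cases h3 : ∃ a ∈ changes, ((PySem.Dict.mk a).getD "risk" "low") = "high" <;>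
      by_cases h4 : ∃ a ∈ changes, ((PySem.Dict.mk a).getD "risk" "low") = "medium" <;>
      simp [pvScore, h3, h4]
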